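-- pv_equiv track=rewrite | github.com/moltencrux/wordlesmash | filter_code.py | _get_sorted_positions
-- ===== SOURCE A (Python) =====
-- def _get_sorted_positions(chars):
--     """Return a list of (letter, sorted_index) for non-None letters in sorted order."""
--     # Filter non-None letters and sort (None sorts last in alphabet)
--     non_none = [c for c in chars if c is not None]
--     sorted_chars = sorted(non_none)  # Sort lexicographically
--     # Map each letter to its index in the sorted list
--     positions = []
--     for c in chars:
--         if c is not None:
--             # Find the index of this letter in sorted_chars (first occurrence)
--             for i, sc in enumerate(sorted_chars):
--                 if sc == c:
--                     positions.append((c, i))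
--                     sorted_chars[i] = None  # Remove to handle duplicates
--                     break
--     return positions
-- ===== SOURCE B (Python) =====
-- def _get_sorted_positions(chars):
--     """Return a list of (letter, sorted_index) for non-None letters in sorted order."""
--     non_none = [c for c in chars if c is not None]
--     s = sorted(non_none)
--     # First sorted index of each letter, computed in one pass over the sorted list.
--     first = {}
--     for i, c in enumerate(s):
--         if c not in first:
--             first[c] = i
--     # k-th occurrence (in chars order) of a letter gets rank first[letter] + k.
--     seen = {}
--     positions = []
--     for c in chars:
--         if c is not None:
--             k = seen.get(c, 0)
--             positions.append((c, first[c] + k))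
--             seen[c] = k + 1
--     return positions
-- ===== Notes on version B (the rewrite author's own statement) =====
-- stated objective: faster
-- what changed: Replaced the per-element linear scan-and-null of the sorted list by a single sort plus a first-index dictionary and a per-letter occurrence counter, so each element is ranked in O(1).
import Mathlib
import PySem

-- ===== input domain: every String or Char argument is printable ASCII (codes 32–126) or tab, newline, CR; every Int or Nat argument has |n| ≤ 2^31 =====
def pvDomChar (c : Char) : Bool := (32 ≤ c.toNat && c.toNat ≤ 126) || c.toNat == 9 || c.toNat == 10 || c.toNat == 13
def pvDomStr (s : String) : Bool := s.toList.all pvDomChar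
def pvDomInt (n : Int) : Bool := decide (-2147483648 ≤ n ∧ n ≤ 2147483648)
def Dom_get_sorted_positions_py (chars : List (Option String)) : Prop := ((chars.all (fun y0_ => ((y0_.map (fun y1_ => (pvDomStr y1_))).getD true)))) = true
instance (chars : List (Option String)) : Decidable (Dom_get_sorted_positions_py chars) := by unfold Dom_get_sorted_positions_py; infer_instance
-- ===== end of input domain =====

-- B replaces A's per-element scan-and-null of the sorted list by a first-index
-- dictionary plus a per-letter occurrence counter (one sort, O(1) per element).

-- ===== PORT A =====
-- inner loop 'for i, sc in enumerate(sorted_chars): if sc == c: …; break':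
-- first index holding `some c`, returned with that slot set to none; none = no match.
def pvAInner (c : String) : List (Option String) → Option (Nat × List (Option String))
  | [] => none
  | sc :: rest =>
    if sc == some c then some (0, none :: rest)
    else
      match pvAInner c rest with
      | some (i, r) => some (i + 1, sc :: r)
      | none => none

-- one iteration of A's outer 'for c in chars' loop (state: sorted_chars, positions)
def pvAStep (st : List (Option String) × List (String × Int)) (c : Option String) :
    List (Option String) × List (String × Int) :=
  match c with
  | none => st
  | some c =>
    match pvAInner c st.1 with
    | some (i, s') => (s', st.2 ++ [(c, (i : Int))])
    | none => st

def get_sorted_positions_py (chars : List (Option String)) : List (String × Int) :=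
  let non_none := chars.filterMap id
  let sorted_chars : List (Option String) :=
    (PySem.List.sorted non_none (fun x => x) false).map some
  (chars.foldl pvAStep (sorted_chars, [])).2

-- ===== PORT B =====
-- 'for i, c in enumerate(s): if c not in first: first[c] = i'
def pvFirstDict (s : List String) : PySem.Dict String Int :=
  (PySem.List.enumerate s).foldl
    (fun d p => if d.contains p.2 then d else d.insert p.2 p.1) PySem.Dict.empty

-- one iteration of B's 'for c in chars' loop (state: seen, positions);
-- 'first[c]' always hits an existing key here, so getD's default is never used.
def pvBStep (first : PySem.Dict String Int)
    (st : PySem.Dict String Int × List (String × Int)) (c : Option String) :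
    PySem.Dict String Int × List (String × Int) :=
  match c with
  | none => st
  | some c =>
    let k := st.1.getD c 0
    (st.1.insert c (k + 1), st.2 ++ [(c, first.getD c 0 + k)])

def get_sorted_positions_py_alt (chars : List (Option String)) : List (String × Int) :=
  let non_none := chars.filterMap id
  let s := PySem.List.sorted non_none (fun x => x) false
  let first := pvFirstDict s
  (chars.foldl (pvBStep first) (PySem.Dict.empty, [])).2

-- ===== PRECONDITION & SPEC =====
def Spec_get_sorted_positions_py (chars : List (Option String)) (out : List (String × Int)) : Prop := out = get_sorted_positions_py_alt chars
instance (chars : List (Option String)) (out : List (String × Int)) : Decidable (Spec_get_sorted_positions_py chars out) := by unfold Spec_get_sorted_positions_py; infer_instance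

-- ===== CLAIM (what is proved, stated in full; the proofs are below) =====
def Claim_equal_get_sorted_positions_py : Prop := ∀ (chars : List (Option String)), Dom_get_sorted_positions_py chars → Spec_get_sorted_positions_py chars (get_sorted_positions_py chars)

-- ===== LEMMAS AND PROOFS =====

-- number of elements of L strictly below c ( = first sorted index of c when c ∈ L)
def pvCL (L : List String) (c : String) : Nat := L.countP (fun x => decide (x < c))

lemma pvCL_cons_pos (x c : String) (t : List String) (h : x < c) :
    pvCL (x :: t) c = pvCL t c + 1 := by
  simp only [pvCL, List.countP_cons, decide_eq_true h]
  simp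

lemma pvCL_cons_neg (x c : String) (t : List String) (h : ¬ x < c) :
    pvCL (x :: t) c = pvCL t c := by
  simp only [pvCL, List.countP_cons, decide_eq_false h]
  simp

lemma pvCL_eq_zero (L : List String) (c : String) (hall : ∀ y ∈ L, c ≤ y) :
    pvCL L c = 0 := by
  simp only [pvCL, List.countP_eq_zero]
  intro y hy
  simp only [decide_eq_true_eq]
  exact not_lt.2 (hall y hy)

-- characterisation of a sorted list: the slots holding c are exactly [pvCL c, pvCL c + count c)
lemma pv_sortchar (L : List String) (hL : L.Pairwise (· ≤ ·)) :
    ∀ (i : Nat) (hi : i < L.length) (c : String),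
      L[i] = c ↔ pvCL L c ≤ i ∧ i < pvCL L c + L.count c := by
  induction L with
  | nil => intro i hi; simp at hi
  | cons x t ih =>
    rw [List.pairwise_cons] at hL
    intro i hi c
    have iht := ih hL.2
    rcases lt_trichotomy x c with hlt | heq | hgt
    · have e1 := pvCL_cons_pos x c t hlt
      have e2 : (x :: t).count c = t.count c := by
        simp only [List.count_cons]
        rw [if_neg (by simp; exact ne_of_lt hlt)]
        omega
      rcases i with _ | i
      · simp only [List.getElem_cons_zero]
        rw [e1, e2]
        constructor
        · intro h; exact absurd h (ne_of_lt hlt)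
        · intro h; omega
      · have hi' : i < t.length := by simpa using hi
        simp only [List.getElem_cons_succ]
        rw [iht i hi' c, e1, e2]
        omega
    · subst heq
      have clt0 : pvCL t x = 0 := pvCL_eq_zero t x (fun y hy => hL.1 y hy)
      have e1 : pvCL (x :: t) x = 0 := by
        rw [pvCL_cons_neg x x t (lt_irrefl x), clt0]
      have e2 : (x :: t).count x = t.count x + 1 := by
        simp
      rcases i with _ | i
      · simp only [List.getElem_cons_zero]
        rw [e1, e2]
        constructor
        · intro _; omega
        · intro _; trivial
      · have hi' : i < t.length := by simpa using hi
        simp only [List.getElem_cons_succ]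
        rw [iht i hi' x, e1, e2, clt0]
        omega
    · have hallt : ∀ y ∈ t, c ≤ y := fun y hy => le_trans (le_of_lt hgt) (hL.1 y hy)
      have clt0 : pvCL t c = 0 := pvCL_eq_zero t c hallt
      have e1 : pvCL (x :: t) c = 0 := by
        rw [pvCL_cons_neg x c t (not_lt.2 (le_of_lt hgt)), clt0]
      have cntt0 : t.count c = 0 := by
        rw [List.count_eq_zero]
        intro hmem
        exact absurd (lt_of_lt_of_le hgt (hL.1 c hmem)) (lt_irrefl c)
      have e2 : (x :: t).count c = 0 := by
        rw [List.count_eq_zero]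
        intro hmem
        rcases List.mem_cons.1 hmem with rfl | hmem
        · exact absurd hgt (lt_irrefl c)
        · exact absurd (lt_of_lt_of_le hgt (hL.1 c hmem)) (lt_irrefl c)
      rcases i with _ | i
      · simp only [List.getElem_cons_zero]
        rw [e1, e2]
        constructor
        · intro h; exact absurd h (ne_of_gt hgt)
        · intro h; omega
      · have hi' : i < t.length := by simpa using hi
        simp only [List.getElem_cons_succ]
        rw [iht i hi' c, e1, e2, clt0, cntt0]
        omega

lemma pv_clcnt_le (L : List String) (c : String) : pvCL L c + L.count c ≤ L.length := by
  have h1 : L.count c ≤ L.countP (fun x => decide ¬((fun x => decide (x < c)) x = true)) := by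
    rw [List.count]
    apply List.countP_mono_left
    intro x _ hx
    have : x = c := by simpa using hx
    subst this; simp
  have hlen := List.length_eq_countP_add_countP (fun x => decide (x < c)) (l := L)
  have hb : List.countP (fun x => decide ¬(fun x => decide (x < c)) x = true) L
      = L.countP (fun x => decide ¬(decide (x < c) = true)) := rfl
  rw [hb] at hlen
  simp only [pvCL]
  omega

lemma pv_inner_spec (c : String) (s : List (Option String)) :
    ∀ (j : Nat), s[j]? = some (some c) → (∀ i, i < j → s[i]? ≠ some (some c)) →
      pvAInner c s = some (j, s.set j none) := by
  induction s with
  | nil => intro j hj _; simp at hj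
  | cons a t ih =>
    intro j hj hmin
    rcases j with _ | j
    · have : a = some c := by simpa using hj
      subst this
      simp [pvAInner]
    · have ha : a ≠ some c := by
        intro h
        exact hmin 0 (Nat.succ_pos j) (by simp [h])
      simp only [pvAInner]
      rw [if_neg (by simpa using ha)]
      rw [ih j (by simpa using hj)
        (fun i hi => by
          have := hmin (i + 1) (by omega)
          simpa using this)]
      simp

lemma pv_fold_first_get? (pairs : List (Int × String)) (c : String) :
    ∀ (d : PySem.Dict String Int),
      (pairs.foldl (fun d p => if d.contains p.2 then d else d.insert p.2 p.1) d).get? c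
        = (d.get? c).or ((pairs.find? (fun p => p.2 == c)).map (·.1)) := by
  induction pairs with
  | nil => intro d; simp
  | cons p t ih =>
    intro d
    simp only [List.foldl_cons]
    by_cases hpc : p.2 = c
    · by_cases hc : d.contains p.2 = true
      · rw [if_pos hc, ih]
        have hv : ∃ v, d.get? p.2 = some v := by
          rwa [PySem.Dict.contains_eq_isSome_get?, Option.isSome_iff_exists] at hc
        obtain ⟨v, hv⟩ := hv
        subst hpc
        rw [List.find?_cons_of_pos (by simp)]
        simp [hv]
      · rw [if_neg hc, ih]
        have hd : d.get? p.2 = none := by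
          rw [PySem.Dict.contains_eq_isSome_get?] at hc
          simpa using hc
        subst hpc
        rw [List.find?_cons_of_pos (by simp)]
        simp [PySem.Dict.get?_insert_self, hd]
    · have hfind : List.find? (fun p => p.2 == c) (p :: t) = List.find? (fun p => p.2 == c) t :=
        List.find?_cons_of_neg (by simpa using hpc)
      by_cases hc : d.contains p.2 = true
      · rw [if_pos hc, ih, hfind]
      · rw [if_neg hc, ih, hfind,
          PySem.Dict.get?_insert_of_ne d p.1 (fun (h : c = p.2) => hpc h.symm)]

lemma pv_find?_enumerate (L : List String) (c : String) :
    ∀ (st : Int) (k : Nat) (hk : k < L.length), L[k] = c →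
      (∀ i (hi : i < k), L[i]'(lt_trans hi hk) ≠ c) →
      List.find? (fun p => p.2 == c) (PySem.List.enumerate L st) = some (st + k, c) := by
  induction L with
  | nil => intro st k hk; simp at hk
  | cons x t ih =>
    intro st k hk hkc hmin
    rw [PySem.List.enumerate_cons]
    rcases k with _ | k
    · have : x = c := by simpa using hkc
      subst this
      rw [List.find?_cons_of_pos (by simp)]
      simp
    · have hx : x ≠ c := by
        have := hmin 0 (Nat.succ_pos k)
        simpa using this
      rw [List.find?_cons_of_neg (by simpa using hx)]
      rw [ih (st + 1) k (by simpa using hk) (by simpa using hkc)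
        (fun i hi => by
          have := hmin (i + 1) (by omega)
          simpa using this)]
      congr 1
      push_cast
      ring_nf

lemma pv_first_getD (L : List String) (hL : L.Pairwise (· ≤ ·)) (c : String) (hc : c ∈ L) :
    (pvFirstDict L).getD c 0 = (pvCL L c : Int) := by
  have hcnt : 0 < L.count c := List.count_pos_iff.2 hc
  have hle := pv_clcnt_le L c
  have hcl : pvCL L c < L.length := by omega
  have h1 : L[pvCL L c]'hcl = c := (pv_sortchar L hL _ hcl c).mpr ⟨le_refl _, by omega⟩
  have h2 : ∀ i (hi : i < pvCL L c), L[i]'(lt_trans hi hcl) ≠ c := by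
    intro i hi h
    rw [pv_sortchar L hL i (lt_trans hi hcl) c] at h
    omega
  unfold pvFirstDict
  rw [PySem.Dict.getD_eq_get?_getD, pv_fold_first_get?,
    pv_find?_enumerate L c 0 (pvCL L c) hcl h1 h2]
  simp

-- the main loop invariant: A's mutated sorted list vs B's per-letter counter
lemma pv_loop_eq (L : List String) (hL : L.Pairwise (· ≤ ·)) :
    ∀ (todo : List (Option String)) (m : String → Nat) (s : List (Option String))
      (seen : PySem.Dict String Int) (acc : List (String × Int)),
      s.length = L.length →
      (∀ i (hi : i < L.length),
        s[i]? = some (if pvCL L (L[i]) + m (L[i]) ≤ i then some (L[i]) else none)) →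
      (∀ c, seen.getD c 0 = (m c : Int)) →
      (∀ c, m c + (todo.filterMap id).count c ≤ L.count c) →
      (todo.foldl pvAStep (s, acc)).2 = (todo.foldl (pvBStep (pvFirstDict L)) (seen, acc)).2 := by
  intro todo
  induction todo with
  | nil => intro m s seen acc _ _ _ _; rfl
  | cons hd tl ih =>
    intro m s seen acc hlen hsi hseen hm
    rcases hd with _ | c
    · simp only [List.foldl_cons]
      refine ih m s seen acc hlen hsi hseen ?_
      intro c
      have := hm c
      simpa using this
    · have hmc : m c + 1 ≤ L.count c := by
        have := hm c
        simp only [List.filterMap_cons, id] at this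
        rw [List.count_cons_self] at this
        omega
      have hcmem : c ∈ L := by
        have : 0 < L.count c := by omega
        exact List.count_pos_iff.1 this
      have hle := pv_clcnt_le L c
      have hj : pvCL L c + m c < L.length := by omega
      -- A finds index j := pvCL L c + m c
      have hLj : L[pvCL L c + m c]'hj = c :=
        (pv_sortchar L hL _ hj c).mpr ⟨by omega, by omega⟩
      have hsj : s[pvCL L c + m c]? = some (some c) := by
        rw [hsi _ hj, hLj]
        simp
      have hmins : ∀ i, i < pvCL L c + m c → s[i]? ≠ some (some c) := by
        intro i hilt h
        have hiL : i < L.length := lt_trans hilt hj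
        rw [hsi i hiL] at h
        by_cases hic : L[i] = c
        · rw [hic] at h
          split at h
          · rename_i hcond
            omega
          · simp at h
        · split at h <;> simp_all
      have hinner := pv_inner_spec c s (pvCL L c + m c) hsj hmins
      -- step both sides
      simp only [List.foldl_cons, pvAStep, pvBStep, hinner]
      have hkey : seen.getD c 0 = (m c : Int) := hseen c
      have hfirst : (pvFirstDict L).getD c 0 = (pvCL L c : Int) := pv_first_getD L hL c hcmem
      have hval : ((pvCL L c + m c : Nat) : Int) = (pvFirstDict L).getD c 0 + seen.getD c 0 := by
        rw [hkey, hfirst]; push_cast; ring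
      rw [hval]
      -- recurse with the updated state
      refine ih (fun x => if x = c then m x + 1 else m x) (s.set (pvCL L c + m c) none)
        (seen.insert c (seen.getD c 0 + 1)) _ ?_ ?_ ?_ ?_
      · simpa using hlen
      · intro i hiL
        have hbeta : ((fun x => if x = c then m x + 1 else m x) (L[i]'hiL))
            = if L[i]'hiL = c then m (L[i]'hiL) + 1 else m (L[i]'hiL) := rfl
        rw [List.getElem?_set, hbeta]
        by_cases hij : pvCL L c + m c = i
        · subst hij
          rw [if_pos rfl, if_pos (by omega), hLj]
          simp only [if_true]
          rw [if_neg (by omega)]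
        · rw [if_neg hij, hsi i hiL]
          by_cases hic : L[i]'hiL = c
          · rw [hic]
            simp only [if_true]
            congr 1
            by_cases hcond : pvCL L c + m c ≤ i
            · rw [if_pos hcond, if_pos (by omega)]
            · rw [if_neg hcond, if_neg (by omega)]
          · rw [if_neg hic]
      · intro c'
        rw [PySem.Dict.getD_insert]
        by_cases hcc : c' = c
        · subst hcc
          rw [if_pos rfl, hkey]
          simp only [if_true]
          push_cast
          ring
        · rw [if_neg hcc, hseen c']
          norm_num [hcc]
      · intro c'
        have := hm c'
        rw [show List.filterMap id (some c :: tl) = c :: List.filterMap id tl from rfl,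
          List.count_cons] at this
        by_cases hcc : c' = c
        · subst hcc
          simp only [if_true]
          simp only [beq_self_eq_true, if_true] at this
          omega
        · simp only [if_neg hcc]
          rw [if_neg (by simp; exact fun h => hcc h.symm)] at this
          omega

-- ===== VERDICT (by name: the statement is the Claim_ definition above) =====
theorem get_sorted_positions_py_spec : Claim_equal_get_sorted_positions_py := by
  intro chars _hdom
  unfold Spec_get_sorted_positions_py
  unfold get_sorted_positions_py get_sorted_positions_py_alt
  set L := PySem.List.sorted (chars.filterMap id) (fun x => x) false with hLdef
  have hL : L.Pairwise (· ≤ ·) := by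
    simpa using PySem.List.sorted_pairwise (chars.filterMap id) (fun x => x)
  refine pv_loop_eq L hL chars (fun _ => 0) (L.map some) PySem.Dict.empty [] ?_ ?_ ?_ ?_
  · simp
  · intro i hi
    rw [List.getElem?_map, List.getElem?_eq_getElem hi]
    have hcl : pvCL L (L[i]) ≤ i := by
      have := (pv_sortchar L hL i hi (L[i])).mp rfl
      omega
    simp only [Option.map_some]
    rw [if_pos (by omega)]
  · intro c
    simp [PySem.Dict.getD_empty]
  · intro c
    have : L.count c = (chars.filterMap id).count c :=
      (PySem.List.sorted_perm (chars.filterMap id) (fun x => x) false).count_eq c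
    show 0 + (chars.filterMap id).count c ≤ L.count c
    omega
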